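-- pv_equiv track=rewrite | github.com/aliuyar1234/datev-lint | datev_lint/core/fix/writer.py | _tokenize_csv_line
-- ===== SOURCE A (Python) =====
-- def _tokenize_csv_line(line: str) -> list[str]:
--     """Tokenize a CSV line, preserving quotes."""
--     tokens: list[str] = []
--     current = ""
--     in_quotes = False
--     i = 0
--
--     while i < len(line):
--         c = line[i]
--
--         if c == '"':
--             if in_quotes:
--                 # Check for escaped quote
--                 if i + 1 < len(line) and line[i + 1] == '"':
--                     current += '""'
--                     i += 2
--                     continue
--                 else:
--                     in_quotes = False
--             else:
--                 in_quotes = True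
--             current += c
--         elif c == ";" and not in_quotes:
--             tokens.append(current)
--             current = ""
--         else:
--             current += c
--         i += 1
--
--     tokens.append(current)
--     return tokens
-- ===== SOURCE B (Python) =====
-- def _tokenize_csv_line(line: str) -> list[str]:
--     """Tokenize a CSV line, preserving quotes."""
--     pieces = line.split(";")
--     tokens: list[str] = []
--     buf = pieces[0]
--     for piece in pieces[1:]:
--         if buf.count('"') % 2 == 1:
--             # semicolon fell inside an open quoted region: rejoin
--             buf = buf + ";" + piece
--         else:
--             tokens.append(buf)
--             buf = piece
--     tokens.append(buf)
--     return tokens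
-- ===== Notes on version B (the rewrite author's own statement) =====
-- stated objective: faster
-- what changed: A's index-based while loop with an in_quotes/escaped-quote state machine is replaced by splitting the line on semicolons and a single fold that rejoins adjacent pieces whenever the running buffer holds an odd number of double-quote characters (the in_quotes flag equals the quote-count parity of the current buffer).
import Mathlib
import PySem

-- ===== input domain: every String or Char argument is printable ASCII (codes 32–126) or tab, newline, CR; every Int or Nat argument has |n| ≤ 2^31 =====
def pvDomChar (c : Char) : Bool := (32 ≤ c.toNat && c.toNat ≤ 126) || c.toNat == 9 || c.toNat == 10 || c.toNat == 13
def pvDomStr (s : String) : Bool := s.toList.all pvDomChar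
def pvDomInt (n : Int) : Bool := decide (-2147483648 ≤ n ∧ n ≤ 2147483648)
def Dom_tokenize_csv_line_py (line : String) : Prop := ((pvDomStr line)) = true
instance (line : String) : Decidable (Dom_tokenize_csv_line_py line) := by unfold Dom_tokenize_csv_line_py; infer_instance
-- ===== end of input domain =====

-- B replaces A's char-by-char state machine by split-on-semicolon followed by a fold that
-- rejoins pieces while the running buffer holds an odd quote count (objective: faster, measured).

-- ===== PORT A =====
-- A's while-loop over i, transcribed as recursion on the remaining characters
-- (line[i] = head, line[i+1] = head of the tail); tokens are built as char lists
-- and turned into Strings at the end.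
def tokA : List Char → List (List Char) → List Char → Bool → List (List Char)
  | [], tokens, current, _ => tokens ++ [current]
  | c :: rest, tokens, current, inq =>
    if c = '"' then
      if inq then
        -- check for escaped quote: i + 1 < len(line) and line[i+1] == '"'
        if rest.head? = some '"' then
          tokA rest.tail tokens (current ++ ['"', '"']) inq    -- i += 2, continue
        else
          tokA rest tokens (current ++ [c]) false
      else
        tokA rest tokens (current ++ [c]) true
    else if c = ';' ∧ inq = false then
      tokA rest (tokens ++ [current]) [] inq
    else
      tokA rest tokens (current ++ [c]) inq
  termination_by cs _ _ _ => cs.length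
  decreasing_by all_goals (simp only [List.length_tail, List.length_cons]; omega)

def tokenize_csv_line_py (line : String) : List String :=
  (tokA line.toList [] [] false).map String.mk

-- ===== PORT B =====
-- Source B's for-loop over pieces[1:] with state (tokens, buf).
def fold1B : List (List Char) → List (List Char) → List Char → List (List Char)
  | [], tokens, buf => tokens ++ [buf]
  | p :: ps, tokens, buf =>
    if buf.count '"' % 2 == 1 then
      fold1B ps tokens (buf ++ ';' :: p)
    else
      fold1B ps (tokens ++ [buf]) p

def tokenize_csv_line_py_alt (line : String) : List String :=
  let pieces := line.toList.splitOn ';'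
  (fold1B pieces.tail [] pieces.headI).map String.mk

-- ===== PRECONDITION & SPEC =====
def Spec_tokenize_csv_line_py (line : String) (out : List String) : Prop := out = tokenize_csv_line_py_alt line
instance (line : String) (out : List String) : Decidable (Spec_tokenize_csv_line_py line out) := by unfold Spec_tokenize_csv_line_py; infer_instance

-- ===== CLAIM (what is proved, stated in full; the proofs are below) =====
def Claim_equal_tokenize_csv_line_py : Prop := ∀ (line : String), Dom_tokenize_csv_line_py line → Spec_tokenize_csv_line_py line (tokenize_csv_line_py line)

-- ===== LEMMAS AND PROOFS =====

lemma splitOn_semi_ne_nil (cs : List Char) : cs.splitOn ';' ≠ [] := by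
  simp [List.splitOn]; exact List.splitOnP_ne_nil _ _

lemma splitOn_semi_cons_semi (rest : List Char) :
    (';' :: rest).splitOn ';' = [] :: rest.splitOn ';' := by
  simp [List.splitOn, List.splitOnP_cons]

lemma splitOn_semi_cons_other (c : Char) (rest : List Char) (h : c ≠ ';') :
    (c :: rest).splitOn ';' = (rest.splitOn ';').modifyHead (c :: ·) := by
  simp [List.splitOn, List.splitOnP_cons, h]

-- one-step reduction lemmas for tokA (each mirrors one branch of A's loop body)
lemma tokA_nil (tokens : List (List Char)) (cur : List Char) (inq : Bool) :
    tokA [] tokens cur inq = tokens ++ [cur] := by simp [tokA]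

lemma tokA_quote_pair (rest2 : List Char) (tokens : List (List Char)) (cur : List Char) :
    tokA ('"' :: '"' :: rest2) tokens cur true = tokA rest2 tokens (cur ++ ['"', '"']) true := by
  conv_lhs => rw [tokA]
  simp

lemma tokA_quote_close (rest : List Char) (h : rest.head? ≠ some '"')
    (tokens : List (List Char)) (cur : List Char) :
    tokA ('"' :: rest) tokens cur true = tokA rest tokens (cur ++ ['"']) false := by
  conv_lhs => rw [tokA]
  simp [h]

lemma tokA_quote_open (rest : List Char) (tokens : List (List Char)) (cur : List Char) :
    tokA ('"' :: rest) tokens cur false = tokA rest tokens (cur ++ ['"']) true := by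
  conv_lhs => rw [tokA]
  simp

lemma tokA_semi_out (rest : List Char) (tokens : List (List Char)) (cur : List Char) :
    tokA (';' :: rest) tokens cur false = tokA rest (tokens ++ [cur]) [] false := by
  conv_lhs => rw [tokA]
  simp

lemma tokA_semi_in (rest : List Char) (tokens : List (List Char)) (cur : List Char) :
    tokA (';' :: rest) tokens cur true = tokA rest tokens (cur ++ [';']) true := by
  conv_lhs => rw [tokA]
  simp

lemma tokA_other (c : Char) (rest : List Char) (h1 : c ≠ '"') (h2 : c ≠ ';')
    (tokens : List (List Char)) (cur : List Char) (inq : Bool) :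
    tokA (c :: rest) tokens cur inq = tokA rest tokens (cur ++ [c]) inq := by
  conv_lhs => rw [tokA]
  simp [h1, h2]

lemma count_append_ne (buf : List Char) {c a : Char} (h : c ≠ a) :
    (buf ++ [c]).count a = buf.count a := by
  simp [List.count_append, h]

-- the invariant: A's in_quotes flag equals the parity of '"' in the current buffer,
-- and with it tokA computes exactly B's fold over the split of the remaining input.
lemma tokA_eq_fold1B : ∀ (n : Nat) (cs : List Char), cs.length ≤ n →
    ∀ (tokens : List (List Char)) (buf : List Char) (inq : Bool),
    inq = (buf.count '"' % 2 == 1) →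
    tokA cs tokens buf inq =
      (match cs.splitOn ';' with
       | [] => tokens ++ [buf]
       | p :: ps => fold1B ps tokens (buf ++ p)) := by
  intro n
  induction n with
  | zero =>
    intro cs hlen tokens buf inq _
    have hcs : cs = [] := List.eq_nil_of_length_eq_zero (Nat.le_zero.mp hlen)
    subst hcs
    simp [tokA_nil, List.splitOn, fold1B]
  | succ n ih =>
    intro cs hlen tokens buf inq hflag
    match cs with
    | [] => simp [tokA_nil, List.splitOn, fold1B]
    | c :: rest =>
      simp only [List.length_cons] at hlen
      have hr : rest.length ≤ n := by omega
      obtain ⟨q, qs, hq⟩ := List.exists_cons_of_ne_nil (splitOn_semi_ne_nil rest)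
      by_cases hquote : c = '"'
      · subst hquote
        rw [splitOn_semi_cons_other _ _ (by decide), hq]
        by_cases hb : buf.count '"' % 2 = 1
        · have hinq : inq = true := by rw [hflag]; simp [hb]
          subst hinq
          cases rest with
          | nil =>
            have h0 : ([] : List Char).splitOn ';' = [[]] := by decide
            rw [h0] at hq
            injection hq with h1 h2
            rw [tokA_quote_close [] (by simp), tokA_nil]
            simp [List.modifyHead, fold1B, ← h1, ← h2]
          | cons c2 rest2 =>
            simp only [List.length_cons] at hr
            by_cases hc2 : c2 = '"'
            · subst hc2
              obtain ⟨r, rs, hr2⟩ := List.exists_cons_of_ne_nil (splitOn_semi_ne_nil rest2)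
              rw [splitOn_semi_cons_other _ _ (by decide), hr2] at hq
              simp only [List.modifyHead] at hq
              injection hq with h1 h2
              rw [tokA_quote_pair,
                  ih rest2 (by omega) tokens (buf ++ ['"', '"']) true
                    (by simp [List.count_append, hb]), hr2]
              simp [List.modifyHead, ← h1, ← h2, List.append_assoc]
            · rw [tokA_quote_close _ (by simp [hc2]),
                  ih (c2 :: rest2) (by simp; omega) tokens (buf ++ ['"']) false
                    (by simp [List.count_append, Nat.add_mod, hb]), hq]
              simp [List.modifyHead, List.append_assoc]
        · have hinq : inq = false := by rw [hflag]; simp [hb]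
          subst hinq
          rw [tokA_quote_open,
              ih rest hr tokens (buf ++ ['"']) true
                (by simp [List.count_append, Nat.add_mod]; omega), hq]
          simp [List.modifyHead, List.append_assoc]
      · by_cases hsemi : c = ';'
        · subst hsemi
          rw [splitOn_semi_cons_semi, hq]
          by_cases hb : buf.count '"' % 2 = 1
          · have hinq : inq = true := by rw [hflag]; simp [hb]
            subst hinq
            rw [tokA_semi_in,
                ih rest hr tokens (buf ++ [';']) true
                  (by simp [count_append_ne _ (by decide : (';' : Char) ≠ '"'), hb]), hq]
            simp [fold1B, hb, List.append_assoc]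
          · have hinq : inq = false := by rw [hflag]; simp [hb]
            subst hinq
            rw [tokA_semi_out, ih rest hr (tokens ++ [buf]) [] false (by decide), hq]
            simp [fold1B, hb]
        · rw [splitOn_semi_cons_other _ _ hsemi, hq]
          rw [tokA_other c rest hquote hsemi,
              ih rest hr tokens (buf ++ [c]) inq
                (by rw [hflag, count_append_ne _ hquote]), hq]
          simp [List.modifyHead, List.append_assoc]

-- ===== VERDICT (by name: the statement is the Claim_ definition above) =====
theorem tokenize_csv_line_py_spec : Claim_equal_tokenize_csv_line_py := by
  intro line _
  unfold Spec_tokenize_csv_line_py tokenize_csv_line_py tokenize_csv_line_py_alt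
  obtain ⟨p, ps, hp⟩ := List.exists_cons_of_ne_nil (splitOn_semi_ne_nil line.toList)
  rw [tokA_eq_fold1B line.toList.length line.toList le_rfl [] [] false (by decide), hp]
  simp
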